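-- pv_equiv track=rewrite | github.com/nidahameed/506archive | review_lab/review.py | sort_candy
-- ===== SOURCE A (Python) =====
-- def sort_candy(bag):
--     chocolate = []
--     fruit = []
--     other = []
--     for candy in bag:
--         if candy == 'snickers' or candy == 'hershey bar' or candy == 'reeses cup':
--             chocolate.append(candy)
--         elif candy == 'starburst' or candy == 'skittles' or candy == 'airheads':
--             fruit.append(candy)
--         else:
--             other.append(candy)
--     return (chocolate, fruit, other)
-- ===== SOURCE B (Python) =====
-- CHOCOLATE = frozenset({'snickers', 'hershey bar', 'reeses cup'})
-- FRUIT = frozenset({'starburst', 'skittles', 'airheads'})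
--
-- def sort_candy(bag):
--     chocolate = [c for c in bag if c in CHOCOLATE]
--     fruit = [c for c in bag if c in FRUIT]
--     other = [c for c in bag if c not in CHOCOLATE and c not in FRUIT]
--     return (chocolate, fruit, other)
-- ===== Notes on version B (the rewrite author's own statement) =====
-- stated objective: idiomatic
-- what changed: Replaced the single branching pass that appends into three accumulators with three independent set-membership filter comprehensions, each scanning the bag once.
import Mathlib
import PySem

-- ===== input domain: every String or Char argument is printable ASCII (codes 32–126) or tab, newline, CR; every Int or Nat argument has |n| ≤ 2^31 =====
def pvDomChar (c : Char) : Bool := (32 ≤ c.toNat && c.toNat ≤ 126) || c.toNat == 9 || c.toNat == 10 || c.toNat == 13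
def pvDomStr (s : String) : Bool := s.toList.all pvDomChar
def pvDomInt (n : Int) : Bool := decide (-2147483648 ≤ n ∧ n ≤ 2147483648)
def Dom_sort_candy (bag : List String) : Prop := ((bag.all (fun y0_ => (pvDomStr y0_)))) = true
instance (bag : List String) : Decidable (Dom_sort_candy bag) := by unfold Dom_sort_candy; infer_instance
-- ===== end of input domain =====

-- B replaces A's single branching pass into three accumulators with three independent
-- set-membership filter passes over the bag (objective: idiomatic decomposition).

-- ===== PORT A =====
-- one loop, branching into three accumulators (Python append = acc ++ [c])
def sort_candy (bag : List String) : List String × List String × List String :=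
  let st := bag.foldl (fun (st : List String × List String × List String) candy =>
    if candy == "snickers" || candy == "hershey bar" || candy == "reeses cup" then
      (st.1 ++ [candy], st.2.1, st.2.2)
    else if candy == "starburst" || candy == "skittles" || candy == "airheads" then
      (st.1, st.2.1 ++ [candy], st.2.2)
    else
      (st.1, st.2.1, st.2.2 ++ [candy])) ([], [], [])
  (st.1, st.2.1, st.2.2)

-- ===== PORT B =====
def pvChocolate : PySem.Set String := PySem.Set.ofList ["snickers", "hershey bar", "reeses cup"]
def pvFruit : PySem.Set String := PySem.Set.ofList ["starburst", "skittles", "airheads"]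

def sort_candy_alt (bag : List String) : List String × List String × List String :=
  ( bag.filter (fun c => PySem.Set.contains pvChocolate c)
  , bag.filter (fun c => PySem.Set.contains pvFruit c)
  , bag.filter (fun c => !PySem.Set.contains pvChocolate c && !PySem.Set.contains pvFruit c) )

-- ===== PRECONDITION & SPEC =====
def Spec_sort_candy (bag : List String) (out : List String × List String × List String) : Prop := out = sort_candy_alt bag
instance (bag : List String) (out : List String × List String × List String) : Decidable (Spec_sort_candy bag out) := by unfold Spec_sort_candy; infer_instance

-- ===== CLAIM (what is proved, stated in full; the proofs are below) =====
def Claim_equal_sort_candy : Prop := ∀ (bag : List String), Dom_sort_candy bag → Spec_sort_candy bag (sort_candy bag)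

-- ===== LEMMAS AND PROOFS =====
-- membership in the literal sets is exactly A's disjunction of equality tests
lemma choc_eq (x : String) :
    PySem.Set.contains pvChocolate x = (x == "snickers" || x == "hershey bar" || x == "reeses cup") := by
  show (["snickers", "hershey bar", "reeses cup"] : List String).contains x = _
  simp only [List.contains_cons, List.contains_nil, Bool.or_false]
  rw [Bool.or_assoc]

lemma fruit_eq (x : String) :
    PySem.Set.contains pvFruit x = (x == "starburst" || x == "skittles" || x == "airheads") := by
  show (["starburst", "skittles", "airheads"] : List String).contains x = _
  simp only [List.contains_cons, List.contains_nil, Bool.or_false]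
  rw [Bool.or_assoc]

-- loop invariant: the fold appends each category's filter to the starting accumulators
lemma sort_candy_fold (bag : List String) (a b c : List String) :
    bag.foldl (fun (st : List String × List String × List String) candy =>
      if candy == "snickers" || candy == "hershey bar" || candy == "reeses cup" then
        (st.1 ++ [candy], st.2.1, st.2.2)
      else if candy == "starburst" || candy == "skittles" || candy == "airheads" then
        (st.1, st.2.1 ++ [candy], st.2.2)
      else
        (st.1, st.2.1, st.2.2 ++ [candy])) (a, b, c)
    = ( a ++ bag.filter (fun x => PySem.Set.contains pvChocolate x)
      , b ++ bag.filter (fun x => PySem.Set.contains pvFruit x)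
      , c ++ bag.filter (fun x => !PySem.Set.contains pvChocolate x && !PySem.Set.contains pvFruit x) ) := by
  induction bag generalizing a b c with
  | nil => simp
  | cons x xs ih =>
    simp only [List.foldl_cons, List.filter_cons]
    by_cases h1 : (x == "snickers" || x == "hershey bar" || x == "reeses cup") = true
    · have hc : PySem.Set.contains pvChocolate x = true := by rw [choc_eq]; exact h1
      have hf : PySem.Set.contains pvFruit x = false := by
        have := h1
        simp only [Bool.or_eq_true, beq_iff_eq] at this
        rcases this with (h | h) | h <;> subst h <;> decide
      have hc' : x ∈ (pvChocolate : List String) := by simpa using hc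
      have hf' : x ∉ (pvFruit : List String) := by simpa using hf
      rw [if_pos h1, ih]
      simp [hc', hf']
    · have hc : PySem.Set.contains pvChocolate x = false := by
        rw [choc_eq]; exact Bool.not_eq_true _ ▸ (by simpa using h1)
      rw [if_neg h1]
      by_cases h2 : (x == "starburst" || x == "skittles" || x == "airheads") = true
      · have hf : PySem.Set.contains pvFruit x = true := by rw [fruit_eq]; exact h2
        have hc' : x ∉ (pvChocolate : List String) := by simpa using hc
        have hf' : x ∈ (pvFruit : List String) := by simpa using hf
        rw [if_pos h2, ih]
        simp [hc', hf']
      · have hf : PySem.Set.contains pvFruit x = false := by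
          rw [fruit_eq]; exact Bool.not_eq_true _ ▸ (by simpa using h2)
        have hc' : x ∉ (pvChocolate : List String) := by simpa using hc
        have hf' : x ∉ (pvFruit : List String) := by simpa using hf
        rw [if_neg h2, ih]
        simp [hc', hf']

-- ===== VERDICT (by name: the statement is the Claim_ definition above) =====
theorem sort_candy_spec : Claim_equal_sort_candy := by
  intro bag _
  unfold Spec_sort_candy sort_candy sort_candy_alt
  rw [sort_candy_fold]
  simp
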